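-- pv_equiv track=rewrite | github.com/maxanisimov/capability-retention-in-continual-rl | experiments/pipelines/frozenlake/sweep_scaled_ppo.py | make_diagonal_source_map
-- ===== SOURCE A (Python) =====
-- def make_diagonal_source_map(size: int, corridor_half_width: int = 1) -> list[str]:
--     rows: list[str] = []
--     for r in range(size):
--         row: list[str] = []
--         for c in range(size):
--             if r == 0 and c == 0:
--                 row.append("S")
--             elif r == size - 1 and c == size - 1:
--                 row.append("G")
--             elif abs(r - c) <= corridor_half_width:
--                 row.append("F")
--             else:
--                 row.append("H")
--         rows.append("".join(row))
--     return rows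
-- ===== SOURCE B (Python) =====
-- def make_diagonal_source_map(size: int, corridor_half_width: int = 1) -> list[str]:
--     if size <= 0:
--         return []
--     rows: list[str] = []
--     for r in range(size):
--         lo = max(0, r - corridor_half_width)
--         hi = min(size, r + corridor_half_width + 1)
--         if hi <= lo:
--             rows.append("H" * size)
--         else:
--             rows.append("H" * lo + "F" * (hi - lo) + "H" * (size - hi))
--     rows[-1] = rows[-1][:-1] + "G"
--     rows[0] = "S" + rows[0][1:]
--     return rows
-- ===== Notes on version B (the rewrite author's own statement) =====
-- stated objective: faster
-- what changed: Replaces the per-cell branch loop with per-row run-length arithmetic: each row is built as 'H'*lo + 'F'*band + 'H'*rest from the clamped corridor interval, and the S/G corners are written once at the end (S last so it wins when size==1).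
import Mathlib
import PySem

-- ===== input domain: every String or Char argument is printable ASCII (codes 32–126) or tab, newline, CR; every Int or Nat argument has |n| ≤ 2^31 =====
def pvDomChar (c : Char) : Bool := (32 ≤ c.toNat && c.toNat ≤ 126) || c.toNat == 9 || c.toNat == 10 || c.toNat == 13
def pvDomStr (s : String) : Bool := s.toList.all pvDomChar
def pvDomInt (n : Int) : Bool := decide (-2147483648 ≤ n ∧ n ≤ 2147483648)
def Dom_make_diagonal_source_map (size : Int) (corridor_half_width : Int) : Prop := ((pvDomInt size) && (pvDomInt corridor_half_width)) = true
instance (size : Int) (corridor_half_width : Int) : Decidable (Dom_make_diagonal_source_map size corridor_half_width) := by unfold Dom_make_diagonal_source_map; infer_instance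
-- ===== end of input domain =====

-- B replaces the per-cell branch loop with per-row run-length arithmetic ('H'*lo + 'F'*band + 'H'*rest)
-- and writes the S/G corners once at the end (S last, so it wins when size == 1); measured faster
-- (constant factor: per-row C-level string multiplication instead of a per-cell interpreted loop).

-- ===== PORT A =====
def make_diagonal_source_map (size : Int) (corridor_half_width : Int) : List String :=
  (PySem.List.pyRange 0 size 1).foldl
    (fun rows r =>
      rows ++ [PySem.Str.join ""
        ((PySem.List.pyRange 0 size 1).foldl
          (fun row c =>
            row ++ [if r = 0 ∧ c = 0 then "S"
                    else if r = size - 1 ∧ c = size - 1 then "G"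
                    else if |r - c| ≤ corridor_half_width then "F"
                    else "H"]) [])]) []

-- ===== PORT B =====
-- Python's  s * n  for a string s and int n (n ≤ 0 gives "")
def pyStrMul (s : String) (n : Int) : String :=
  String.ofList ((List.replicate n.toNat s.toList).flatten)

def make_diagonal_source_map_alt (size : Int) (corridor_half_width : Int) : List String :=
  if size ≤ 0 then []
  else
    let rows := (PySem.List.pyRange 0 size 1).foldl
      (fun rows r =>
        let lo := max 0 (r - corridor_half_width)
        let hi := min size (r + corridor_half_width + 1)
        rows ++ [if hi ≤ lo then pyStrMul "H" size
                 else pyStrMul "H" lo ++ pyStrMul "F" (hi - lo) ++ pyStrMul "H" (size - hi)]) []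
    let rows1 := rows.set (rows.length - 1)
      (PySem.Str.slice (rows.getLastD "") none (some (-1)) ++ "G")
    rows1.set 0 ("S" ++ PySem.Str.slice (rows1.headD "") (some 1) none)

-- ===== PRECONDITION & SPEC =====
def Spec_make_diagonal_source_map (size : Int) (corridor_half_width : Int) (out : List String) : Prop := out = make_diagonal_source_map_alt size corridor_half_width
instance (size : Int) (corridor_half_width : Int) (out : List String) : Decidable (Spec_make_diagonal_source_map size corridor_half_width out) := by unfold Spec_make_diagonal_source_map; infer_instance

-- ===== CLAIM (what is proved, stated in full; the proofs are below) =====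
def Claim_equal_make_diagonal_source_map : Prop := ∀ (size : Int) (corridor_half_width : Int), Dom_make_diagonal_source_map size corridor_half_width → Spec_make_diagonal_source_map size corridor_half_width (make_diagonal_source_map size corridor_half_width)

-- ===== LEMMAS AND PROOFS =====

-- the character A's inner loop appends at row r, column c
def pvCell (size w r c : Int) : Char :=
  if r = 0 ∧ c = 0 then 'S'
  else if r = size - 1 ∧ c = size - 1 then 'G'
  else if |r - c| ≤ w then 'F'
  else 'H'

-- the pure corridor character (no corners)
def pvBand (w r c : Int) : Char := if |r - c| ≤ w then 'F' else 'H'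

-- A's row r as a list of characters
lemma pvRowA_toList (size w r : Int) :
    (PySem.Str.join ""
      ((PySem.List.pyRange 0 size 1).map
        (fun c =>
          if r = 0 ∧ c = 0 then ("S" : String)
          else if r = size - 1 ∧ c = size - 1 then "G"
          else if |r - c| ≤ w then "F"
          else "H"))).toList
    = (PySem.List.pyRange 0 size 1).map (pvCell size w r) := by
  have h1 : ((PySem.List.pyRange 0 size 1).map
      (fun c => if r = 0 ∧ c = 0 then ("S":String)
                else if r = size - 1 ∧ c = size - 1 then "G"
                else if |r - c| ≤ w then "F" else "H")).map String.toList
      = ((PySem.List.pyRange 0 size 1).map (pvCell size w r)).map (fun c => [c]) := by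
    simp only [List.map_map]
    refine List.map_congr_left (fun c _ => ?_)
    simp only [Function.comp, pvCell]
    split_ifs <;> rfl
  rw [PySem.Str.toList_join, h1]
  simpa using PySem.Chars.join_nil_singletons ((PySem.List.pyRange 0 size 1).map (pvCell size w r))

-- B's row r as a list of characters (run-length form)
lemma pvRowB_toList (size w r : Int) :
    (if min size (r + w + 1) ≤ max 0 (r - w) then pyStrMul "H" size
     else pyStrMul "H" (max 0 (r - w)) ++ pyStrMul "F" (min size (r + w + 1) - max 0 (r - w))
          ++ pyStrMul "H" (size - min size (r + w + 1))).toList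
    = (if min size (r + w + 1) ≤ max 0 (r - w) then List.replicate size.toNat 'H'
       else List.replicate (max 0 (r - w)).toNat 'H'
            ++ List.replicate (min size (r + w + 1) - max 0 (r - w)).toNat 'F'
            ++ List.replicate (size - min size (r + w + 1)).toNat 'H') := by
  split_ifs <;> simp [pyStrMul]

-- the heart: the run-length row equals the per-cell corridor row
lemma pvBand_row (size w r : Int) :
    (if min size (r + w + 1) ≤ max 0 (r - w) then List.replicate size.toNat 'H'
     else List.replicate (max 0 (r - w)).toNat 'H'
          ++ List.replicate (min size (r + w + 1) - max 0 (r - w)).toNat 'F'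
          ++ List.replicate (size - min size (r + w + 1)).toNat 'H')
    = (PySem.List.pyRange 0 size 1).map (pvBand w r) := by
  rw [PySem.List.pyRange_one]
  by_cases hle : min size (r + w + 1) ≤ max 0 (r - w)
  · rw [if_pos hle]
    symm
    rw [List.eq_replicate_iff]
    refine ⟨by simp, ?_⟩
    intro b hb
    simp only [List.map_map, List.mem_map, List.mem_range, Function.comp, zero_add] at hb
    obtain ⟨k, hk, rfl⟩ := hb
    unfold pvBand
    rw [if_neg]
    intro habs
    rw [abs_le] at habs
    omega
  · rw [if_neg hle]
    apply List.ext_getElem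
    · simp; omega
    · intro i h1 h2
      simp only [List.length_append, List.length_replicate, List.length_map,
        List.length_range] at h1 h2
      simp only [List.getElem_map, List.getElem_range, List.getElem_append,
        List.length_replicate, List.getElem_replicate, List.length_append]
      unfold pvBand
      split_ifs with g1 g2 g3 <;>
        first | rfl | (exfalso; simp only [abs_le, zero_add] at *; omega)

-- off the two corners, A's cell is the plain corridor character
lemma pvCell_eq_band (size w r c : Int) (h0 : ¬(r = 0 ∧ c = 0))
    (h1 : ¬(r = size - 1 ∧ c = size - 1)) : pvCell size w r c = pvBand w r c := by
  unfold pvCell pvBand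
  rw [if_neg h0, if_neg h1]

-- B's row r as the per-cell corridor row
lemma pvRowB_chars (size w r : Int) :
    (if min size (r + w + 1) ≤ max 0 (r - w) then pyStrMul "H" size
     else pyStrMul "H" (max 0 (r - w)) ++ pyStrMul "F" (min size (r + w + 1) - max 0 (r - w))
          ++ pyStrMul "H" (size - min size (r + w + 1))).toList
    = (PySem.List.pyRange 0 size 1).map (pvBand w r) := by
  rw [pvRowB_toList]
  exact pvBand_row size w r

-- Python s[1:] on the character list
lemma pvTail_slice (s : List Char) : PySem.Chars.slice s (some 1) none = s.tail :=
  PySem.List.slice_from_one s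

-- ===== VERDICT (by name: the statement is the Claim_ definition above) =====
theorem make_diagonal_source_map_spec : Claim_equal_make_diagonal_source_map := by
  intro size w _
  unfold Spec_make_diagonal_source_map make_diagonal_source_map make_diagonal_source_map_alt
  by_cases hs : size ≤ 0
  · rw [if_pos hs, PySem.List.pyRange_one_eq_nil hs]
    rfl
  rw [if_neg hs]
  rw [not_le] at hs
  simp only [PySem.List.foldl_append_singleton_eq_map, List.nil_append]
  set R := PySem.List.pyRange 0 size 1 with hR
  set fA : Int → String := fun r =>
    PySem.Str.join "" (List.map (fun c =>
      if r = 0 ∧ c = 0 then "S"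
      else if r = size - 1 ∧ c = size - 1 then "G"
      else if |r - c| ≤ w then "F" else "H") R) with hfA
  set fB : Int → String := fun r =>
    if min size (r + w + 1) ≤ max 0 (r - w) then pyStrMul "H" size
    else pyStrMul "H" (max 0 (r - w)) ++ pyStrMul "F" (min size (r + w + 1) - max 0 (r - w))
         ++ pyStrMul "H" (size - min size (r + w + 1)) with hfB
  have hAchars : ∀ r, (fA r).toList = R.map (pvCell size w r) := by
    intro r; rw [hfA, hR]; exact pvRowA_toList size w r
  have hBchars : ∀ r, (fB r).toList = R.map (pvBand w r) := by
    intro r; rw [hfB, hR]; exact pvRowB_chars size w r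
  have hRlen : R.length = size.toNat := by
    rw [hR, PySem.List.length_pyRange_one]; omega
  have hRget : ∀ (i : Nat) (h : i < R.length), R[i] = (i : Int) := by
    intro i h
    exact (PySem.List.getElem_pyRange_one 0 size i h).trans (zero_add _)
  have hrowslen : (R.map fB).length = size.toNat := by rw [List.length_map, hRlen]
  have hlast : (R.map fB).getLastD "" = fB (size - 1) := by
    have hlt : (R.map fB).length - 1 < (R.map fB).length := by rw [hrowslen]; omega
    rw [List.getLastD_eq_getLast?, List.getLast?_eq_getElem?, List.getElem?_eq_getElem hlt,
      Option.getD_some, List.getElem_map, hRget]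
    congr 1
    rw [hrowslen] at hlt ⊢
    omega
  have hXchars : (PySem.Str.slice ((R.map fB).getLastD "") none (some (-1)) ++ "G").toList
      = (R.map (pvBand w (size - 1))).dropLast ++ ['G'] := by
    rw [String.toList_append, PySem.Str.slice_to_neg_one, hlast, hBchars]
    rfl
  apply List.ext_getElem
  · simp [hrowslen, hRlen]
  intro i h1 h2
  rw [List.getElem_set, List.getElem_set, List.getElem_map, hRget]
  by_cases hi0 : i = 0
  · subst hi0
    rw [if_pos rfl]
    apply String.toList_inj.mp
    rw [String.toList_append, hAchars]
    by_cases hn1 : size = 1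
    · subst hn1
      have hone : R = [0] := by rw [hR]; exact PySem.List.pyRange_one_singleton 0
      have h01 : (R.map fB).length - 1 = 0 := by rw [hrowslen]; rfl
      rw [h01]
      have hhead : ((R.map fB).set 0
          (PySem.Str.slice ((R.map fB).getLastD "") none (some (-1)) ++ "G")).headD ""
          = PySem.Str.slice ((R.map fB).getLastD "") none (some (-1)) ++ "G" := by
        rw [hone]; rfl
      rw [hhead, PySem.Str.toList_slice, hXchars, hone]
      simp [pvCell, PySem.List.slice_from_one]
    · -- size ≥ 2: the head of rows1 is still fB 0
      have hne : (R.map fB).length - 1 ≠ 0 := by rw [hrowslen]; omega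
      have hRne : R ≠ [] := by
        intro h; rw [h] at hRlen; simp at hRlen; omega
      have hhead : ((R.map fB).set ((R.map fB).length - 1)
          (PySem.Str.slice ((R.map fB).getLastD "") none (some (-1)) ++ "G")).headD ""
          = fB 0 := by
        have h0lt : 0 < ((R.map fB).set ((R.map fB).length - 1)
            (PySem.Str.slice ((R.map fB).getLastD "") none (some (-1)) ++ "G")).length := by
          rw [List.length_set, hrowslen]; omega
        rw [List.headD_eq_head?, List.head?_eq_getElem?, List.getElem?_eq_getElem h0lt,
          Option.getD_some, List.getElem_set, if_neg hne, List.getElem_map, hRget]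
        norm_num
      rw [hhead, PySem.Str.toList_slice, pvTail_slice, hBchars]
      have hcons : R = 0 :: PySem.List.pyRange 1 size 1 := by
        rw [hR]; exact PySem.List.pyRange_one_cons hs
      rw [hcons]
      simp only [List.map_cons, List.tail_cons, Nat.cast_zero]
      have hS : pvCell size w 0 0 = 'S' := by simp [pvCell]
      rw [hS, show ("S".toList) = ['S'] from rfl, List.singleton_append, List.cons.injEq]
      refine ⟨rfl, List.map_congr_left (fun c hc => ?_)⟩
      rw [PySem.List.mem_pyRange_one] at hc
      exact pvCell_eq_band size w 0 c (by omega) (by omega)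
  · rw [if_neg (fun h => hi0 h.symm)]
    by_cases hil : (R.map fB).length - 1 = i
    · -- last row, i ≥ 1 so size ≥ 2
      rw [if_pos hil]
      have hsz2 : 2 ≤ size := by rw [hrowslen] at hil; omega
      have hiv : (i : Int) = size - 1 := by rw [hrowslen] at hil; omega
      rw [hiv]
      apply String.toList_inj.mp
      rw [hAchars, hXchars]
      have hsplit : R = PySem.List.pyRange 0 (size - 1) 1 ++ [size - 1] := by
        rw [hR]
        have h := PySem.List.pyRange_one_succ_right (a := 0) (b := size - 1) (by omega)
        rw [sub_add_cancel] at h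
        exact h
      rw [hsplit]
      simp only [List.map_append, List.map_cons, List.map_nil, List.dropLast_concat]
      have hG : pvCell size w (size - 1) (size - 1) = 'G' := by
        unfold pvCell
        rw [if_neg (by intro h; omega), if_pos ⟨rfl, rfl⟩]
      rw [hG, List.append_cancel_right_eq]
      refine List.map_congr_left (fun c hc => ?_)
      rw [PySem.List.mem_pyRange_one] at hc
      exact pvCell_eq_band size w (size - 1) c (by omega) (by omega)
    · -- middle row
      rw [if_neg hil, List.getElem_map, hRget]
      apply String.toList_inj.mp
      rw [hAchars, hBchars]
      have hi1 : 1 ≤ i := by omega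
      have hilt : (i : Int) < size - 1 := by
        rw [List.length_map, hRlen] at h1 hil
        omega
      refine List.map_congr_left (fun c hc => ?_)
      rw [hR, PySem.List.mem_pyRange_one] at hc
      exact pvCell_eq_band size w i c (by omega) (by omega)
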